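-- pv_equiv track=rewrite | github.com/mbdulkadiroglu/mixture-of-LoRA | src/evaluation/sql_cleaning.py | _split_at_unquoted_semicolon
-- ===== SOURCE A (Python) =====
-- def _split_at_unquoted_semicolon(text: str) -> tuple[str, str | None]:
--     """
--     Split text at the first semicolon outside single/double-quoted strings.
--
--     Returns (head, tail_without_semicolon). If no such semicolon exists,
--     returns (text, None).
--     """
--     in_single = False
--     in_double = False
--     i = 0
--
--     while i < len(text):
--         ch = text[i]
--         nxt = text[i + 1] if i + 1 < len(text) else ""
--
--         if ch == "'" and not in_double:
--             # SQL escaped single quote inside single-quoted string: ''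
--             if in_single and nxt == "'":
--                 i += 2
--                 continue
--             in_single = not in_single
--         elif ch == '"' and not in_single:
--             # SQL escaped double quote inside double-quoted identifier: ""
--             if in_double and nxt == '"':
--                 i += 2
--                 continue
--             in_double = not in_double
--         elif ch == ";" and not in_single and not in_double:
--             return text[:i], text[i + 1:]
--
--         i += 1
--
--     return text, None
-- ===== SOURCE B (Python) =====
-- def _split_at_unquoted_semicolon(text: str) -> "tuple[str, str | None]":
--     """
--     Split text at the first semicolon outside single/double-quoted strings.
--
--     Instead of maintaining in_single/in_double flags, an outer loop scans for
--     a quote or semicolon; on a quote, an inner loop consumes the whole quoted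
--     span (doubled quotes are escapes; an unterminated quote runs to the end).
--     """
--     n = len(text)
--     i = 0
--     while i < n:
--         ch = text[i]
--         if ch == "'" or ch == '"':
--             j = i + 1
--             while j < n:
--                 if text[j] != ch:
--                     j += 1
--                 elif j + 1 < n and text[j + 1] == ch:
--                     j += 2
--                 else:
--                     j += 1
--                     break
--             i = j
--         elif ch == ";":
--             return text[:i], text[i + 1:]
--         else:
--             i += 1
--     return text, None
-- ===== Notes on version B (the rewrite author's own statement) =====
-- stated objective: alternative
-- what changed: Replaces A's single scanner with in_single/in_double state flags by a two-level scan: an outer loop looks for a quote or semicolon, and on a quote an inner loop consumes the entire quoted span (doubled-quote escapes included) before the outer scan resumes.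
import Mathlib
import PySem

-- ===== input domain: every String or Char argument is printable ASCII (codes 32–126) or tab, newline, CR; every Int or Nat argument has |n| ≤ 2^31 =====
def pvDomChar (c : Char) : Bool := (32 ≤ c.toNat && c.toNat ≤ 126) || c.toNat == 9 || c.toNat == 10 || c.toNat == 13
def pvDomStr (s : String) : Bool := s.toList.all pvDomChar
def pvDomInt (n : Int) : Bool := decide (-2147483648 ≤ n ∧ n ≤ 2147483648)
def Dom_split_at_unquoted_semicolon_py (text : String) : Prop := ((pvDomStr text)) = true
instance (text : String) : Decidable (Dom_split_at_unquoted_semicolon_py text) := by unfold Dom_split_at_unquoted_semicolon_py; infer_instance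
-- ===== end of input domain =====

-- B replaces A's in_single/in_double flag automaton by an outer scan that, on a quote,
-- consumes the whole quoted span with an inner loop (objective: alternative; same cost).

-- ===== PORT A =====
-- A's while loop: index i and the two flags; nxt is text[i+1] if it exists ("" otherwise),
-- modelled as Option Char since it is only compared against quote characters.
def splitA_loop (cs : List Char) (i : Nat) (inS inD : Bool) : String × Option String :=
  if h : i < cs.length then
    let ch := cs[i]
    let nxt : Option Char := if h2 : i + 1 < cs.length then some cs[i+1] else none
    if ch = '\'' ∧ inD = false then
      if inS = true ∧ nxt = some '\'' then
        splitA_loop cs (i + 2) inS inD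
      else
        splitA_loop cs (i + 1) (!inS) inD
    else if ch = '"' ∧ inS = false then
      if inD = true ∧ nxt = some '"' then
        splitA_loop cs (i + 2) inS inD
      else
        splitA_loop cs (i + 1) inS (!inD)
    else if ch = ';' ∧ inS = false ∧ inD = false then
      ((cs.take i).asString, some ((cs.drop (i + 1)).asString))
    else
      splitA_loop cs (i + 1) inS inD
  else
    (cs.asString, none)
termination_by cs.length - i

def split_at_unquoted_semicolon_py (text : String) : String × Option String :=
  splitA_loop text.toList 0 false false

-- ===== PORT B =====
-- inner loop of B: consume a quoted span opened with quote character q, starting after it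
def splitB_quote (cs : List Char) (q : Char) (j : Nat) : Nat :=
  if h : j < cs.length then
    if cs[j] ≠ q then splitB_quote cs q (j + 1)
    else if h2 : j + 1 < cs.length then
      if cs[j+1] = q then splitB_quote cs q (j + 2) else j + 1
    else j + 1
  else j
termination_by cs.length - j

theorem splitB_quote_le (cs : List Char) (q : Char) (j : Nat) : j ≤ splitB_quote cs q j := by
  rw [splitB_quote]
  split_ifs with h h1 h2 h3
  · exact Nat.le_trans (Nat.le_succ j) (splitB_quote_le cs q (j+1))
  · exact Nat.le_trans (by omega) (splitB_quote_le cs q (j+2))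
  · omega
  · omega
  · omega
termination_by cs.length - j

-- outer loop of B
def splitB_loop (cs : List Char) (i : Nat) : String × Option String :=
  if h : i < cs.length then
    let ch := cs[i]
    if ch = '\'' ∨ ch = '"' then
      splitB_loop cs (splitB_quote cs ch (i + 1))
    else if ch = ';' then
      ((cs.take i).asString, some ((cs.drop (i + 1)).asString))
    else
      splitB_loop cs (i + 1)
  else
    (cs.asString, none)
termination_by cs.length - i
decreasing_by
  · have := splitB_quote_le cs cs[i] (i+1); omega
  · omega

def split_at_unquoted_semicolon_py_alt (text : String) : String × Option String :=
  splitB_loop text.toList 0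

-- ===== PRECONDITION & SPEC =====
def Spec_split_at_unquoted_semicolon_py (text : String) (out : String × Option String) : Prop := out = split_at_unquoted_semicolon_py_alt text
instance (text : String) (out : String × Option String) : Decidable (Spec_split_at_unquoted_semicolon_py text out) := by unfold Spec_split_at_unquoted_semicolon_py; infer_instance

-- ===== CLAIM (what is proved, stated in full; the proofs are below) =====
def Claim_equal_split_at_unquoted_semicolon_py : Prop := ∀ (text : String), Dom_split_at_unquoted_semicolon_py text → Spec_split_at_unquoted_semicolon_py text (split_at_unquoted_semicolon_py text)

-- ===== LEMMAS AND PROOFS =====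

-- While A is inside a single-quoted span at index j, it behaves exactly like
-- B's inner loop until the span closes (or the text ends).
theorem quoteS (cs : List Char) (j : Nat) :
    splitA_loop cs j true false = splitA_loop cs (splitB_quote cs '\'' j) false false := by
  rw [splitB_quote]
  by_cases h : j < cs.length
  · simp only [h, dif_pos]
    by_cases hq : cs[j] = '\''
    · rw [splitA_loop]
      simp only [h, dif_pos, hq]
      by_cases h2 : j + 1 < cs.length
      · simp only [h2, dif_pos]
        by_cases hq2 : cs[j+1] = '\''
        · simpa [hq, hq2] using quoteS cs (j+2)
        · simp [hq2]
      · simp [h2]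
    · rw [splitA_loop]
      simp only [h, dif_pos]
      simp only [hq]
      simpa [hq] using quoteS cs (j+1)
  · rw [splitA_loop]
    conv_rhs => rw [splitA_loop]
    simp [h]
termination_by cs.length - j
decreasing_by all_goals omega

-- Same for a double-quoted span.
theorem quoteD (cs : List Char) (j : Nat) :
    splitA_loop cs j false true = splitA_loop cs (splitB_quote cs '"' j) false false := by
  rw [splitB_quote]
  by_cases h : j < cs.length
  · simp only [h, dif_pos]
    by_cases hq : cs[j] = '"'
    · rw [splitA_loop]
      simp only [h, dif_pos, hq]
      by_cases h2 : j + 1 < cs.length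
      · simp only [h2, dif_pos]
        by_cases hq2 : cs[j+1] = '"'
        · simpa [hq, hq2] using quoteD cs (j+2)
        · simp [hq2]
      · simp [h2]
    · rw [splitA_loop]
      simp only [h, dif_pos]
      simp only [hq]
      by_cases hq' : cs[j] = '\''
      · simpa [hq'] using quoteD cs (j+1)
      · simpa [hq', hq] using quoteD cs (j+1)
  · rw [splitA_loop]
    conv_rhs => rw [splitA_loop]
    simp [h]
termination_by cs.length - j
decreasing_by all_goals omega

-- Outside any quoted span the two loops agree.
theorem loop_eq (cs : List Char) (i : Nat) :
    splitA_loop cs i false false = splitB_loop cs i := by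
  rw [splitA_loop, splitB_loop]
  by_cases h : i < cs.length
  · simp only [h, dif_pos]
    by_cases hS : cs[i] = '\''
    · have : splitA_loop cs (i+1) true false = splitB_loop cs (splitB_quote cs cs[i] (i+1)) := by
        rw [hS, quoteS]
        exact loop_eq cs (splitB_quote cs '\'' (i+1))
      simpa [hS] using this
    · by_cases hD : cs[i] = '"'
      · have : splitA_loop cs (i+1) false true = splitB_loop cs (splitB_quote cs cs[i] (i+1)) := by
          rw [hD, quoteD]
          exact loop_eq cs (splitB_quote cs '"' (i+1))
        simpa [hS, hD] using this
      · by_cases hC : cs[i] = ';'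
        · simp [hC]
        · simpa [hS, hD, hC] using loop_eq cs (i+1)
  · simp [h]
termination_by cs.length - i
decreasing_by
  all_goals first
    | (have := splitB_quote_le cs '\'' (i+1); omega)
    | (have := splitB_quote_le cs '"' (i+1); omega)
    | omega

-- ===== VERDICT (by name: the statement is the Claim_ definition above) =====
theorem split_at_unquoted_semicolon_py_spec : Claim_equal_split_at_unquoted_semicolon_py := by
  intro text _
  unfold Spec_split_at_unquoted_semicolon_py split_at_unquoted_semicolon_py split_at_unquoted_semicolon_py_alt
  exact loop_eq text.toList 0
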